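-- pv_equiv track=rewrite | github.com/Matheus-Schmitz/Reddit_Hate | scripts/10-Generate_Vocabularies.py | word_counts_from_list_of_strings
-- ===== SOURCE A (Python) =====
-- from collections import Counter
-- import string
--
-- def word_counts_from_list_of_strings(lines):
--     # Lowercase and remove newlines
--     lines = [line.lower().replace('\n', ' ').strip() for line in lines if line is not None]
--
--     # Remove subreddit tags
--     lines = [line.replace(' r/', ' ').strip() for line in lines]
--     lines = [line.replace(' /r/', ' ').strip() for line in lines]
--
--     # Remove punctuation
--     lines = [line.translate(str.maketrans(' ', ' ', string.punctuation)) for line in lines]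
--
--     # Remove URLs and tokenize
--     words = [word for line in lines for word in line.split() if 'http' not in word]
--
--     # Get word counts
--     word_counts = Counter(words)
--
--     return word_counts
-- ===== SOURCE B (Python) =====
-- import string
--
-- _PUNCT = frozenset(string.punctuation)
--
--
-- def _untag(s, tag):
--     # remove subreddit tags: left-to-right scan replacing each occurrence of
--     # tag with a single space (non-overlapping, like str.replace(tag, ' '))
--     out = []
--     i = 0
--     n = len(s)
--     while i < n:
--         if s.startswith(tag, i):
--             out.append(' ')
--             i += len(tag)
--         else:
--             out.append(s[i])
--             i += 1
--     return ''.join(out)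
--
--
-- def word_counts_from_list_of_strings(lines):
--     counts = {}
--     for line in lines:
--         if line is None:
--             continue
--         # lowercase and turn newlines into spaces in one character pass
--         s = ''.join(' ' if c == '\n' else c.lower() for c in line).strip()
--         # remove subreddit tags
--         s = _untag(s, ' r/').strip()
--         s = _untag(s, ' /r/').strip()
--         # single character scan: drop punctuation, cut tokens at whitespace,
--         # and count each kept token on the fly (no intermediate lists)
--         cur = []
--         for c in s + ' ':  # trailing sentinel space flushes the last token
--             if c in _PUNCT:
--                 continue
--             if c.isspace():
--                 if cur:
--                     w = ''.join(cur)
--                     if 'http' not in w: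
--                         counts[w] = counts.get(w, 0) + 1
--                     cur = []
--             else:
--                 cur.append(c)
--     return counts
-- ===== Notes on version B (the rewrite author's own statement) =====
-- stated objective: alternative
-- what changed: Replaces A's staged string pipeline (lower/replace/strip/translate over five intermediate line lists, then split and Counter) with explicit character-level scans per line: a fused lowercase+newline character map, a hand-written left-to-right tag scanner, and a single character-scan tokenizer that drops punctuation, cuts tokens at whitespace and counts each kept token into a dict on the fly, never materializing intermediate token or line lists.
import Mathlib
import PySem

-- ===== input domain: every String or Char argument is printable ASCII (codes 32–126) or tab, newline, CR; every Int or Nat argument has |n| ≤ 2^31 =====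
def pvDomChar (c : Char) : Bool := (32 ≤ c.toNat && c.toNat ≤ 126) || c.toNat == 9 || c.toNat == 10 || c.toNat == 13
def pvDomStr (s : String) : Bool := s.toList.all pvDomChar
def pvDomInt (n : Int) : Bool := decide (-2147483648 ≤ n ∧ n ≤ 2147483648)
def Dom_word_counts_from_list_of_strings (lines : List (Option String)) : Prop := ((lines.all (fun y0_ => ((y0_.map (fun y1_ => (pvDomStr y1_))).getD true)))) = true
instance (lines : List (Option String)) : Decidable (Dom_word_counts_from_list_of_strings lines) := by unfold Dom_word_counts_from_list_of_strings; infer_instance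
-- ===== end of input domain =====

-- B replaces A's staged string pipeline (lower/replace/translate/split over five intermediate
-- lists, then Counter) by explicit character-level scans: a fused lower+newline char map, a
-- hand-written left-to-right tag scanner, and a single char-scan tokenizer that drops
-- punctuation, cuts tokens at whitespace and counts kept tokens on the fly (objective: alternative).

-- string.punctuation
def pvPunct : List Char := "!\"#$%&'()*+,-./:;<=>?@[\\]^_`{|}~".toList

-- ===== PORT A =====
-- line.translate(str.maketrans(' ', ' ', string.punctuation)): the ' '→' ' mapping is the
-- identity, so translate deletes exactly the punctuation characters (exact on all strings).
def pvRemovePunct (s : String) : String := String.ofList (s.toList.filter (fun c => !(pvPunct.contains c)))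

def word_counts_from_list_of_strings (lines : List (Option String)) : List (String × Int) :=
  let l1 := (lines.filterMap id).map (fun line => PySem.Str.strip (PySem.Str.replace (PySem.Str.lower line) "\n" " "))
  let l2 := l1.map (fun line => PySem.Str.strip (PySem.Str.replace line " r/" " "))
  let l3 := l2.map (fun line => PySem.Str.strip (PySem.Str.replace line " /r/" " "))
  let l4 := l3.map pvRemovePunct
  let words := l4.flatMap (fun line => (PySem.Str.split₀ line).filter (fun w => !(PySem.Str.isIn "http" w)))
  (PySem.Dict.counter words).items

-- ===== PORT B =====
-- "' ' if c == '\n' else c.lower()" (one character of B's fused lowercasing pass)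
def pvLowerNl (c : Char) : Char := if c = '\n' then ' ' else PySem.Chars.lowerChar c

-- _untag(s, tag): left-to-right scan, each occurrence of tag (= t0 :: tr) becomes one space
def pvUntag (t0 : Char) (tr : List Char) : List Char → List Char
  | [] => []
  | c :: t =>
    if (t0 :: tr).isPrefixOf (c :: t) then ' ' :: pvUntag t0 tr (t.drop tr.length)
    else c :: pvUntag t0 tr t
termination_by l => l.length
decreasing_by all_goals (simp; try omega)

-- "counts[w] = counts.get(w, 0) + 1" guarded by "'http' not in w"
def pvCount (d : PySem.Dict String Int) (w : String) : PySem.Dict String Int :=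
  if !(PySem.Str.isIn "http" w) then d.insert w (d.getD w 0 + 1) else d

-- B's single char-scan tokenizer-counter over "s + ' '" (cur = the current token so far)
def pvTok (d : PySem.Dict String Int) (cur : List Char) : List Char → PySem.Dict String Int
  | [] => d
  | c :: rest =>
    if pvPunct.contains c then pvTok d cur rest
    else if PySem.Chars.isspace c then
      if cur.isEmpty then pvTok d [] rest
      else pvTok (pvCount d (String.ofList cur)) [] rest
    else pvTok d (cur ++ [c]) rest

-- the three cleaning scans B applies to one line
def pvCleanLine (line : String) : List Char :=
  let s1 := PySem.Chars.strip (line.toList.map pvLowerNl)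
  let s2 := PySem.Chars.strip (pvUntag ' ' ['r', '/'] s1)
  PySem.Chars.strip (pvUntag ' ' ['/', 'r', '/'] s2)

-- one iteration of B's outer loop
def pvStepLineB (d : PySem.Dict String Int) (opt : Option String) : PySem.Dict String Int :=
  match opt with
  | none => d
  | some line => pvTok d [] (pvCleanLine line ++ [' '])

def word_counts_from_list_of_strings_alt (lines : List (Option String)) : List (String × Int) :=
  (lines.foldl pvStepLineB PySem.Dict.empty).items

-- ===== PRECONDITION & SPEC =====
def Spec_word_counts_from_list_of_strings (lines : List (Option String)) (out : List (String × Int)) : Prop := out = word_counts_from_list_of_strings_alt lines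
instance (lines : List (Option String)) (out : List (String × Int)) : Decidable (Spec_word_counts_from_list_of_strings lines out) := by unfold Spec_word_counts_from_list_of_strings; infer_instance

-- ===== CLAIM (what is proved, stated in full; the proofs are below) =====
def Claim_equal_word_counts_from_list_of_strings : Prop := ∀ (lines : List (Option String)), Dom_word_counts_from_list_of_strings lines → Spec_word_counts_from_list_of_strings lines (word_counts_from_list_of_strings lines)

-- ===== LEMMAS AND PROOFS =====

-- non-punctuation characters (the ones A's translate keeps)
def pvKeep (c : Char) : Bool := !(pvPunct.contains c)

-- replace with a single-character pattern is a character map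
theorem pvReplaceGo_single (a b : Char) :
    ∀ (n : Nat) (l acc : List Char), l.length ≤ n →
      PySem.Chars.replace.go [a] [b] n l acc
        = acc.reverse ++ l.map (fun c => if c = a then b else c) := by
  intro n
  induction n with
  | zero =>
    intro l acc h
    have hl : l = [] := List.eq_nil_of_length_eq_zero (Nat.le_zero.mp h)
    subst hl
    simp [PySem.Chars.replace.go]
  | succ n ih =>
    intro l acc h
    cases l with
    | nil => simp [PySem.Chars.replace.go]
    | cons c t =>
      have ht : t.length ≤ n := by simpa using h
      rw [PySem.Chars.replace.go]
      by_cases hac : a = c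
      · subst hac
        simp [List.isPrefixOf, ih t (b :: acc) ht]
      · have hne : (a == c) = false := by simp [hac]
        simp [List.isPrefixOf, hne, ih t (c :: acc) ht, Ne.symm hac]

theorem pvReplace_single (a b : Char) (l : List Char) :
    PySem.Chars.replace l [a] [b] = l.map (fun c => if c = a then b else c) := by
  have h := pvReplaceGo_single a b l.length l [] le_rfl
  simpa [PySem.Chars.replace] using h

-- per character: lowercasing then mapping '\n' to ' ' is B's fused map
theorem pvLowerNl_char (c : Char) :
    (if PySem.Chars.lowerChar c = '\n' then ' ' else PySem.Chars.lowerChar c) = pvLowerNl c := by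
  by_cases hc : c = '\n'
  · subst hc
    simp [pvLowerNl, show PySem.Chars.lowerChar '\n' = '\n' from by decide]
  · have hne : PySem.Chars.lowerChar c ≠ '\n' := by
      unfold PySem.Chars.lowerChar
      by_cases hu : PySem.Chars.isupper c = true
      · rw [if_pos hu]
        simp only [PySem.Chars.isupper, Bool.and_eq_true, decide_eq_true_eq] at hu
        have h1 : 65 ≤ c.toNat := UInt32.le_iff_toNat_le.mp (Char.le_def.mp hu.1)
        have h2 : c.toNat ≤ 90 := UInt32.le_iff_toNat_le.mp (Char.le_def.mp hu.2)
        intro heq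
        have htn : (Char.ofNat (c.toNat + 32)).toNat = ('\n').toNat := by rw [heq]
        rw [Char.toNat_ofNat] at htn
        have hv : (c.toNat + 32).isValidChar := Or.inl (by omega)
        rw [if_pos hv] at htn
        have h10 : ('\n').toNat = 10 := by decide
        omega
      · rw [if_neg hu]; exact hc
    simp [pvLowerNl, hne, hc]

theorem pvClean1 (l : List Char) :
    PySem.Chars.replace (PySem.Chars.lower l) ['\n'] [' '] = l.map pvLowerNl := by
  rw [pvReplace_single]
  simp only [PySem.Chars.lower, List.map_map]
  exact List.map_congr_left (fun c _ => pvLowerNl_char c)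

-- B's tag scanner is exactly replace(tag, ' ')
theorem pvUntagGo (t0 : Char) (tr : List Char) :
    ∀ (n : Nat) (l acc : List Char), l.length ≤ n →
      PySem.Chars.replace.go (t0 :: tr) [' '] n l acc = acc.reverse ++ pvUntag t0 tr l := by
  intro n
  induction n with
  | zero =>
    intro l acc h
    have hl : l = [] := List.eq_nil_of_length_eq_zero (Nat.le_zero.mp h)
    subst hl
    simp [PySem.Chars.replace.go, pvUntag]
  | succ n ih =>
    intro l acc h
    cases l with
    | nil => simp [PySem.Chars.replace.go, pvUntag]
    | cons c t =>
      have ht : t.length ≤ n := by simpa using h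
      rw [PySem.Chars.replace.go]
      simp only [pvUntag]
      by_cases hp : (t0 :: tr).isPrefixOf (c :: t) = true
      · rw [if_pos hp, if_pos hp]
        have hlen : (List.drop (t0 :: tr).length (c :: t)).length ≤ n := by
          simp; omega
        rw [ih _ _ hlen]
        simp
      · rw [if_neg hp, if_neg hp]
        rw [ih t (c :: acc) ht]
        simp

theorem pvUntag_eq (t0 : Char) (tr : List Char) (l : List Char) :
    pvUntag t0 tr l = PySem.Chars.replace l (t0 :: tr) [' '] := by
  have h := pvUntagGo t0 tr l.length l [] le_rfl
  simp at h
  simp [PySem.Chars.replace, h]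

-- A's cleaned line, at character level, is B's cleaned line
theorem pvClean_eq (line : String) :
    (PySem.Str.strip (PySem.Str.replace (PySem.Str.strip (PySem.Str.replace
      (PySem.Str.strip (PySem.Str.replace (PySem.Str.lower line) "\n" " "))
      " r/" " ")) " /r/" " ")).toList = pvCleanLine line := by
  simp only [PySem.Str.strip, PySem.Str.replace, PySem.Str.lower, String.toList_ofList, pvCleanLine]
  rw [show "\n".toList = ['\n'] from rfl, show " ".toList = [' '] from rfl,
      show " r/".toList = [' ', 'r', '/'] from rfl, show " /r/".toList = [' ', '/', 'r', '/'] from rfl]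
  rw [pvClean1, ← pvUntag_eq, ← pvUntag_eq]

-- split₀.go: the accumulator comes out in front
theorem pvSplitGoAcc :
    ∀ (l cur : List Char) (acc : List (List Char)),
      PySem.Chars.split₀.go l cur acc = acc.reverse ++ PySem.Chars.split₀.go l cur [] := by
  intro l
  induction l with
  | nil =>
    intro cur acc
    by_cases hcur : cur.isEmpty = true
    · simp [PySem.Chars.split₀.go, hcur]
    · simp [PySem.Chars.split₀.go, hcur]
  | cons c rest ih =>
    intro cur acc
    by_cases hsp : PySem.Chars.isspace c = true
    · by_cases hcur : cur.isEmpty = true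
      · simp only [PySem.Chars.split₀.go, hsp, hcur, if_true, if_pos]
        exact ih [] acc
      · simp only [PySem.Chars.split₀.go, hsp, hcur, if_true, if_neg, Bool.false_eq_true,
          if_false]
        rw [ih [] (cur.reverse :: acc), ih [] [cur.reverse]]
        simp
    · simp only [PySem.Chars.split₀.go, hsp, Bool.false_eq_true, if_false]
      exact ih (c :: cur) acc

-- B's tokenizer-counter equals folding pvCount over split₀ of the punctuation-filtered chars
theorem pvTok_eq :
    ∀ (cs cur : List Char) (d : PySem.Dict String Int),
      pvTok d cur (cs ++ [' '])
        = List.foldl pvCount d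
            ((PySem.Chars.split₀.go (cs.filter pvKeep) cur.reverse []).map String.ofList) := by
  have hp0 : pvPunct.contains ' ' = false := by decide
  have hp0' : ' ' ∉ pvPunct := by decide
  have hs0 : PySem.Chars.isspace ' ' = true := by decide
  intro cs
  induction cs with
  | nil =>
    intro cur d
    by_cases hcur : cur.isEmpty = true
    · have hc0 : cur = [] := by simpa [List.isEmpty_iff] using hcur
      subst hc0
      simp [pvTok, PySem.Chars.split₀.go, hp0, hs0]
    · have hrev : cur.reverse.isEmpty = false := by
        cases hx : cur.isEmpty <;> simp_all [List.isEmpty_iff]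
      simp [pvTok, PySem.Chars.split₀.go, hp0', hs0, hcur, hrev]
  | cons c rest ih =>
    intro cur d
    by_cases hp : pvPunct.contains c = true
    · have hp' : c ∈ pvPunct := by simpa using hp
      have hk : pvKeep c = false := by simp [pvKeep, hp']
      simp only [List.cons_append, pvTok, hp, if_true]
      rw [List.filter_cons_of_neg (by simp [hk])]
      exact ih cur d
    · have hp' : c ∉ pvPunct := by simpa using hp
      have hk : pvKeep c = true := by simp [pvKeep, hp']
      by_cases hs : PySem.Chars.isspace c = true
      · by_cases hcur : cur.isEmpty = true
        · have hc0 : cur = [] := by simpa [List.isEmpty_iff] using hcur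
          subst hc0
          simp only [List.cons_append, pvTok, hp, Bool.false_eq_true, if_false, hs, if_true,
            List.isEmpty_nil]
          rw [List.filter_cons_of_pos (by simp [hk])]
          simp only [PySem.Chars.split₀.go, hs, List.reverse_nil, List.isEmpty_nil, if_true]
          exact ih [] d
        · have hrev : cur.reverse.isEmpty = false := by
            cases hx : cur.isEmpty <;> simp_all [List.isEmpty_iff]
          simp only [List.cons_append, pvTok, hp, Bool.false_eq_true, if_false, hs, if_true, hcur]
          rw [List.filter_cons_of_pos (by simp [hk])]
          simp only [PySem.Chars.split₀.go, hs, hrev, Bool.false_eq_true, if_false, if_true,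
            List.reverse_reverse]
          rw [pvSplitGoAcc _ [] [cur]]
          simp only [List.reverse_cons, List.reverse_nil, List.nil_append, List.map_append,
            List.map_cons, List.map_nil, List.foldl_append, List.foldl_cons, List.foldl_nil]
          exact ih [] (pvCount d (String.ofList cur))
      · simp only [List.cons_append, pvTok, hp, Bool.false_eq_true, if_false, hs]
        rw [List.filter_cons_of_pos (by simp [hk])]
        simp only [PySem.Chars.split₀.go, hs, Bool.false_eq_true, if_false]
        have := ih (cur ++ [c]) d
        simpa [List.reverse_append] using this

-- B's whole loop is one fold of pvCount over all tokens of all lines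
theorem pvFoldB (lines : List (Option String)) (d : PySem.Dict String Int) :
    lines.foldl pvStepLineB d
      = List.foldl pvCount d
          ((lines.filterMap id).flatMap
            (fun line => (PySem.Chars.split₀ ((pvCleanLine line).filter pvKeep)).map String.ofList)) := by
  induction lines generalizing d with
  | nil => simp
  | cons h t ih =>
    cases h with
    | none => simpa [pvStepLineB] using ih d
    | some line =>
      simp only [List.foldl_cons, pvStepLineB]
      rw [ih, pvTok_eq]
      simp [PySem.Chars.split₀, List.foldl_append]

-- per line: A's cleaned, punctuation-stripped, split and filtered tokens are B's tokens
theorem pvLineTokens (line : String) :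
    (PySem.Str.split₀ (pvRemovePunct (PySem.Str.strip (PySem.Str.replace (PySem.Str.strip
      (PySem.Str.replace (PySem.Str.strip (PySem.Str.replace (PySem.Str.lower line) "\n" " "))
      " r/" " ")) " /r/" " ")))).filter (fun w => !(PySem.Str.isIn "http" w))
    = ((PySem.Chars.split₀ ((pvCleanLine line).filter pvKeep)).map String.ofList).filter
        (fun w => !(PySem.Str.isIn "http" w)) := by
  have h1 : pvRemovePunct (PySem.Str.strip (PySem.Str.replace (PySem.Str.strip
      (PySem.Str.replace (PySem.Str.strip (PySem.Str.replace (PySem.Str.lower line) "\n" " "))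
      " r/" " ")) " /r/" " ")) = String.ofList ((pvCleanLine line).filter pvKeep) := by
    unfold pvRemovePunct
    rw [pvClean_eq]
    rfl
  rw [h1]
  simp [PySem.Str.split₀]

-- ===== VERDICT (by name: the statement is the Claim_ definition above) =====
set_option maxHeartbeats 1600000 in
theorem word_counts_from_list_of_strings_spec : Claim_equal_word_counts_from_list_of_strings := by
  intro lines _
  unfold Spec_word_counts_from_list_of_strings word_counts_from_list_of_strings word_counts_from_list_of_strings_alt
  rw [pvFoldB]
  rw [show pvCount = (fun (d : PySem.Dict String Int) (w : String) =>
        if (!(PySem.Str.isIn "http" w)) = true then d.insert w (d.getD w 0 + 1) else d) from rfl]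
  rw [PySem.List.foldl_if_eq_foldl_filter, PySem.Dict.foldl_insert_getD_add_one_eq_counter]
  refine congrArg (fun d => PySem.Dict.items d) (congrArg PySem.Dict.counter ?_)
  rw [List.filter_flatMap]
  simp only [List.map_map]
  rw [List.flatMap_map]
  exact congrArg (fun g => List.flatMap g (List.filterMap id lines)) (funext (fun line => pvLineTokens line))
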